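-- pv_equiv track=rewrite | github.com/parkkunghyun/backjoon-1 | 프로그래머스/lv2/131704. 택배상자/택배상자.py | solution
-- ===== SOURCE A (Python) =====
-- from collections import deque
--
-- def solution(order):
--     answer = 0
--     q = [i for i in range(1,len(order)+1)]
--     q = deque(q)
--     stack = deque()
--     orderCount = 0
--     while q:
--         if order[orderCount] != q[0]:
--             if stack and order[orderCount] == stack[-1]:
--                 orderCount +=1
--                 stack.pop()
--             else:
--                 stack.append(q.popleft())
--         else:
--             orderCount+=1
--             q.popleft()
--
--     while stack:
--         if order[orderCount] == stack[-1]: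
--             orderCount+=1
--             stack.pop()
--         else:
--             break
--
--     return orderCount
-- ===== SOURCE B (Python) =====
-- def solution(order):
--     stack = []
--     i = 0
--     for box in range(1, len(order) + 1):
--         stack.append(box)
--         while stack and stack[-1] == order[i]:
--             stack.pop()
--             i += 1
--     return i
-- ===== Notes on version B (the rewrite author's own statement) =====
-- stated objective: simpler
-- what changed: Replaces A's two deques and dual while-loops (conveyor queue vs. stack with a three-way branch, plus a trailing drain loop) by a single for-loop over box numbers 1..n that pushes each box and then pops all stack tops matching the next order entry via one delivered-count pointer.
import Mathlib
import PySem

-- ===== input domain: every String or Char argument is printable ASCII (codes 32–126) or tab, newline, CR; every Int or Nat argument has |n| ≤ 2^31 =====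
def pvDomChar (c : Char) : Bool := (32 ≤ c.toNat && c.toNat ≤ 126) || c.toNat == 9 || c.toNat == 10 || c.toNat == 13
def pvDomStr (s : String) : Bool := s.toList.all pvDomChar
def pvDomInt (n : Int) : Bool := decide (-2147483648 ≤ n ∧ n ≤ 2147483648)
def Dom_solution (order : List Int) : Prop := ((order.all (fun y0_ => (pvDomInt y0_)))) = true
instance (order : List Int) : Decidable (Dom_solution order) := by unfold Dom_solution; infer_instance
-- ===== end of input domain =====

-- B replaces A's deque-based two-while-loop simulation by one for-loop over the conveyor
-- boxes with an integer delivered-count pointer (simpler decomposition, same return value).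

-- ===== PORT A =====
-- A's deques are lists: q with its front at the head, stack with its TOP at the head
-- (deque.append/pop act on the same end, so head-as-top is the faithful representation).
-- Second while loop of A:
def pvLoop2A (order stack : List Int) (oc : Int) : Int :=
  match stack with
  | [] => oc
  | top :: rest =>
    match PySem.List.pyGet? order oc with
    | some v => if v = top then pvLoop2A order rest (oc + 1) else oc
    | none => oc   -- Python would raise IndexError here; unreachable from solution's entry state

-- First while loop of A:
def pvLoop1A (order q stack : List Int) (oc : Int) : Int :=
  match q with
  | [] => pvLoop2A order stack oc
  | b :: qrest =>
    match PySem.List.pyGet? order oc with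
    | none => oc   -- Python would raise IndexError here; unreachable from solution's entry state
    | some v =>
      if v ≠ b then
        match stack with
        | top :: srest =>
          if v = top then pvLoop1A order (b :: qrest) srest (oc + 1)
          else pvLoop1A order qrest (b :: top :: srest) oc
        | [] => pvLoop1A order qrest [b] oc
      else pvLoop1A order qrest stack (oc + 1)
termination_by 2 * q.length + stack.length
decreasing_by all_goals (simp only [List.length_cons]; omega)

def solution (order : List Int) : Int :=
  pvLoop1A order (PySem.List.pyRange 1 (PySem.List.len order + 1) 1) [] 0

-- ===== PORT B =====
-- B's inner while loop: pop matching stack tops, advancing the delivered pointer i.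
def pvDrainB (order stack : List Int) (i : Int) : List Int × Int :=
  match stack with
  | [] => ([], i)
  | t :: rest =>
    match PySem.List.pyGet? order i with
    | some v => if v = t then pvDrainB order rest (i + 1) else (t :: rest, i)
    | none => (t :: rest, i)   -- Python would raise IndexError here; unreachable from solution_alt's entry state

-- B's for-loop body: push the next conveyor box, then drain.
def pvStepB (order : List Int) (st : List Int × Int) (box : Int) : List Int × Int :=
  pvDrainB order (box :: st.1) st.2

def solution_alt (order : List Int) : Int :=
  ((PySem.List.pyRange 1 (PySem.List.len order + 1) 1).foldl (pvStepB order) ([], 0)).2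

-- ===== PRECONDITION & SPEC =====
def Spec_solution (order : List Int) (out : Int) : Prop := out = solution_alt order
instance (order : List Int) (out : Int) : Decidable (Spec_solution order out) := by unfold Spec_solution; infer_instance

-- ===== CLAIM (what is proved, stated in full; the proofs are below) =====
def Claim_equal_solution : Prop := ∀ (order : List Int), Dom_solution order → Spec_solution order (solution order)

-- ===== LEMMAS AND PROOFS =====

-- A's trailing drain loop returns exactly the pointer component of B's drain.
theorem pvLoop2A_eq_drain (order : List Int) :
    ∀ (stack : List Int) (oc : Int), pvLoop2A order stack oc = (pvDrainB order stack oc).2 := by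
  intro stack
  induction stack with
  | nil => intro oc; simp [pvLoop2A, pvDrainB]
  | cons top rest ih =>
    intro oc
    rw [pvLoop2A, pvDrainB]
    cases h : PySem.List.pyGet? order oc with
    | none => simp
    | some v =>
      by_cases hv : v = top
      · simp [hv, ih]
      · simp [hv]

-- Bisimulation: from any reachable joint state, A's main loop computes the pointer
-- component of B's fold over the remaining conveyor boxes, started after a drain.
-- Invariants: the stack and the remaining queue hold pairwise distinct boxes, and the
-- pointer counts exactly the boxes already consumed (oc + |stack| + |q| = |order|).
theorem pvMain (order : List Int) :
    ∀ (m : Nat) (q stack : List Int) (oc : Int),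
      2 * q.length + stack.length ≤ m →
      (stack ++ q).Nodup →
      0 ≤ oc →
      oc + stack.length + q.length = order.length →
      pvLoop1A order q stack oc = (q.foldl (pvStepB order) (pvDrainB order stack oc)).2 := by
  intro m
  induction m with
  | zero =>
    intro q stack oc hm hnd h0 hoc
    have hq : q = [] := by cases q <;> simp_all
    subst hq
    simpa [pvLoop1A] using pvLoop2A_eq_drain order stack oc
  | succ m ih =>
    intro q stack oc hm hnd h0 hoc
    cases q with
    | nil =>
      simpa [pvLoop1A] using pvLoop2A_eq_drain order stack oc
    | cons b qrest =>
      have hlt : oc < (order.length : Int) := by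
        simp at hoc; omega
      have hget : PySem.List.pyGet? order oc = some order[oc.toNat] :=
        PySem.List.pyGet?_eq_some_getElem order h0 (by simpa using hlt)
      have hbstack : b ∉ stack := by
        intro hb
        exact List.disjoint_of_nodup_append hnd hb (List.mem_cons_self)
      rw [pvLoop1A, hget]
      by_cases hvb : order[oc.toNat] = b
      · -- deliver from the conveyor: in B, push b then immediately pop it
        have hdrain : pvDrainB order stack oc = (stack, oc) := by
          cases stack with
          | nil => rfl
          | cons top srest =>
            have hne : order[oc.toNat] ≠ top := by
              intro h
              exact hbstack (by rw [← hvb, h]; exact List.mem_cons_self)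
            rw [pvDrainB, hget]; simp [hne]
        have hstep : pvStepB order (stack, oc) b = pvDrainB order stack (oc + 1) := by
          rw [pvStepB, pvDrainB, hget]; simp [hvb]
        simp only [hvb, ne_eq, not_true_eq_false, if_false, List.foldl_cons, hdrain, hstep]
        exact ih qrest stack (oc + 1)
          (by simp only [List.length_cons] at hm ⊢; omega)
          (hnd.sublist ((List.Sublist.refl stack).append (List.sublist_cons_self b qrest)))
          (by omega)
          (by simp only [List.length_cons] at hoc ⊢; push_cast at hoc ⊢; omega)
      · cases stack with
        | nil =>
          -- push onto the empty stack
          have hstep : pvStepB order (([] : List Int), oc) b = ([b], oc) := by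
            rw [pvStepB, pvDrainB, hget]; simp [hvb]
          have h1 : pvDrainB order [b] oc = ([b], oc) := by
            rw [pvDrainB, hget]; simp [hvb]
          simp only [ne_eq, hvb, not_false_eq_true, if_true, List.foldl_cons]
          rw [show pvDrainB order ([] : List Int) oc = (([] : List Int), oc) from rfl,
            hstep, ← h1]
          exact ih qrest [b] oc
            (by simp only [List.length_cons, List.length_nil] at hm ⊢; omega)
            (by simpa using hnd) h0
            (by simp only [List.length_cons, List.length_nil] at hoc ⊢;
                push_cast at hoc ⊢; omega)
        | cons top srest =>
          by_cases hvt : order[oc.toNat] = top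
          · -- deliver from the stack
            have hdrain : pvDrainB order (top :: srest) oc = pvDrainB order srest (oc + 1) := by
              rw [pvDrainB, hget]; simp [hvt]
            simp only [ne_eq, hvb, not_false_eq_true, if_true]
            rw [if_pos hvt, hdrain]
            exact ih (b :: qrest) srest (oc + 1)
              (by simp only [List.length_cons] at hm ⊢; omega)
              (hnd.sublist ((List.sublist_cons_self top srest).append (List.Sublist.refl _)))
              (by omega)
              (by simp only [List.length_cons] at hoc ⊢; push_cast at hoc ⊢; omega)
          · -- push onto a non-empty stack
            have hdrain : pvDrainB order (top :: srest) oc = (top :: srest, oc) := by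
              rw [pvDrainB, hget]; simp [hvt]
            have hstep : pvStepB order (top :: srest, oc) b = (b :: top :: srest, oc) := by
              rw [pvStepB, pvDrainB, hget]; simp [hvb]
            have h1 : pvDrainB order (b :: top :: srest) oc = (b :: top :: srest, oc) := by
              rw [pvDrainB, hget]; simp [hvb]
            simp only [ne_eq, hvb, not_false_eq_true, if_true, List.foldl_cons]
            rw [if_neg hvt, hdrain, hstep, ← h1]
            exact ih qrest (b :: top :: srest) oc
              (by simp only [List.length_cons] at hm ⊢; omega)
              (by simpa using List.perm_middle.nodup_iff.mp hnd) h0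
              (by simp only [List.length_cons] at hoc ⊢; push_cast at hoc ⊢; omega)

-- ===== VERDICT (by name: the statement is the Claim_ definition above) =====
theorem solution_spec : Claim_equal_solution := by
  unfold Claim_equal_solution
  intro order _
  unfold Spec_solution solution solution_alt
  have hq := PySem.List.nodup_pyRange_one 1 (PySem.List.len order + 1)
  have hlen : (PySem.List.pyRange 1 (PySem.List.len order + 1) 1).length = order.length := by
    rw [PySem.List.length_pyRange_one]
    simp [PySem.List.len_eq]
  have := pvMain order (2 * (PySem.List.pyRange 1 (PySem.List.len order + 1) 1).length)
    (PySem.List.pyRange 1 (PySem.List.len order + 1) 1) [] 0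
    (by simp) (by simpa using hq) (by omega)
    (by simp only [List.length_nil, hlen]; push_cast; ring)
  simpa [pvDrainB] using this
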